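-- pv_equiv track=rewrite | github.com/Kwakcena/codeplus-SW-competency | programmers/Monthly-Code-Challenge-Season-1/blowing-up_test.py | solution
-- ===== SOURCE A (Python) =====
-- def solution(a):
--     left_index = 0
--     right_index = len(a) - 1
--
--     min_count = [0] * len(a)
--
--     left_min_value = a[left_index]
--     for i in range(1, len(a)):
--         if left_min_value > a[i]:
--             left_min_value = a[i]
--             continue
--         min_count[i] += 1
--
--     right_min_value = a[right_index]
--     for j in range(len(a) - 2, -1, -1):
--         if right_min_value > a[j]:
--             right_min_value = a[j]
--             continue
--         min_count[j] += 1
--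
--     return (len(list(filter(lambda x: x != 2, min_count))))
-- ===== SOURCE B (Python) =====
-- def solution(a):
--     n = len(a)
--     return sum(1 for i in range(n)
--                if (i == 0 or a[i] < min(a[:i])) or (i == n - 1 or a[i] < min(a[i + 1:])))
-- ===== Notes on version B (the rewrite author's own statement) =====
-- stated objective: simpler
-- what changed: A runs two running-minimum sweeps that mutate a per-index count array and then filters the counts; B is a single comprehension that counts each index directly by the defining predicate (strictly below every earlier element, or last / strictly below every later element), with no running state at all.
import Mathlib
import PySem

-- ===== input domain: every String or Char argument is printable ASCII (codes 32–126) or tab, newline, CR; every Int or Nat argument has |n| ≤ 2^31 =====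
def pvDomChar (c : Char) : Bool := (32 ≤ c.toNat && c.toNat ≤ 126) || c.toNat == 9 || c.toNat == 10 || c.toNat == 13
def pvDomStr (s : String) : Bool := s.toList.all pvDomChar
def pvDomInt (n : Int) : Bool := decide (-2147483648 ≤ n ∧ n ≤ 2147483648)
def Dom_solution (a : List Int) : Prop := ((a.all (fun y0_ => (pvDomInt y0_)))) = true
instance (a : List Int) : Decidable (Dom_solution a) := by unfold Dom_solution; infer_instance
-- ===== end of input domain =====

-- B drops A's two running-minimum sweeps and mutable count array: it counts each index by the
-- defining predicate directly (strictly below every earlier element, or every later one);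
-- objective: simpler (B is O(n^2) where A is O(n)).

-- ===== PORT A =====
-- loop body of both of A's passes: running min vs a[i], else min_count[i] += 1
def stepA (a : List Int) (st : Int × List Int) (i : Nat) : Int × List Int :=
  if st.1 > a.getD i 0 then (a.getD i 0, st.2)
  else (st.1, st.2.set i (st.2.getD i 0 + 1))

def solution (a : List Int) : Int :=
  let n := a.length
  let minCount : List Int := List.replicate n 0
  -- a[left_index], index zero: Python raises IndexError on the empty list; Pre_solution excludes it (a.getD exact for an in-range index)
  let leftMin : Int := a.getD 0 0
  -- range(1, len(a)) = [1, …, n-1] ported as List.range' 1 (n-1) (exact)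
  let st1 := (List.range' 1 (n - 1)).foldl (stepA a) (leftMin, minCount)
  -- a[right_index], the last element: raises on the empty list as well (excluded by Pre_solution)
  let rightMin : Int := a.getD (n - 1) 0
  -- range(len(a)-2, -1, -1) = [n-2, …, 0] ported as (List.range (n-1)).reverse (exact)
  let st2 := ((List.range (n - 1)).reverse).foldl (stepA a) (rightMin, st1.2)
  ((st2.2.filter (fun x => x != 2)).length : Int)

-- ===== PORT B =====
-- Source B: sum(1 for i in range(n) if (i == 0 or a[i] < min(a[:i])) or (i == n-1 or a[i] < min(a[i+1:])))
-- a[:i] / a[i+1:] with nonnegative bounds ported as take/drop (exact); a[i] in range as getD (exact);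
-- min(l) for the guarded-nonempty slice ported as foldl min over l with l's first element as the
-- initial value (exact for nonempty l; the i == 0 / i == n-1 guard makes the slice nonempty);
-- the counting comprehension as countP.
def solution_alt (a : List Int) : Int :=
  (((List.range a.length).countP (fun i =>
      ((i == 0) || decide (a.getD i 0 < (a.take i).foldl min (a.getD 0 0))) ||
      ((i == a.length - 1) || decide (a.getD i 0 < (a.drop (i + 1)).foldl min (a.getD (i + 1) 0))))) : Int)

-- ===== PRECONDITION & SPEC =====
-- Pre_ excludes only the empty list, on which Python A raises IndexError at its first-element access.
def Pre_solution (a : List Int) : Prop := a ≠ []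
instance (a : List Int) : Decidable (Pre_solution a) := by unfold Pre_solution; infer_instance
def pvWitness_solution : List Int := [2, -1, 3, -1, 0]
def Spec_solution (a : List Int) (out : Int) : Prop := out = solution_alt a
instance (a : List Int) (out : Int) : Decidable (Spec_solution a out) := by unfold Spec_solution; infer_instance

-- ===== CLAIM (what is proved, stated in full; the proofs are below) =====
def Claim_equal_solution : Prop := ∀ (a : List Int), Dom_solution a → Pre_solution a → Spec_solution a (solution a)

-- ===== LEMMAS AND PROOFS =====

-- i is a strict prefix minimum: a[i] is strictly below every earlier element (true at i = 0)
def Pb (a : List Int) (i : Nat) : Bool := (a.take i).all (fun x => decide (a.getD i 0 < x))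
-- i is a strict suffix minimum: a[i] is strictly below every later element (true at i = n-1)
def Qb (a : List Int) (i : Nat) : Bool := (a.drop (i + 1)).all (fun x => decide (a.getD i 0 < x))

-- the running minima of the two passes
def mTake (a : List Int) (k : Nat) : Int := (a.take k).foldl min (a.getD 0 0)
def mDrop (a : List Int) (k : Nat) : Int := (a.drop k).foldl min (a.getD (a.length - 1) 0)

-- contribution of the left / right pass to min_count[i]
def lv (a : List Int) (i : Nat) : Int := if Pb a i then 0 else 1
def rv (a : List Int) (i : Nat) : Int := if Qb a i then 0 else 1

theorem lt_foldl_min (l : List Int) (d x : Int) :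
    x < l.foldl min d ↔ x < d ∧ ∀ y ∈ l, x < y := by
  induction l generalizing d with
  | nil => simp
  | cons z t ih =>
    simp only [List.foldl_cons, ih, lt_min_iff, List.mem_cons]
    constructor
    · rintro ⟨⟨h1, h2⟩, h3⟩
      refine ⟨h1, ?_⟩
      rintro y (rfl | hy)
      · exact h2
      · exact h3 y hy
    · rintro ⟨h1, h2⟩
      exact ⟨⟨h1, h2 z (Or.inl rfl)⟩, fun y hy => h2 y (Or.inr hy)⟩

theorem foldl_min_comm (l : List Int) (d x : Int) :
    l.foldl min (min d x) = min (l.foldl min d) x := by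
  induction l generalizing d with
  | nil => simp
  | cons z t ih => simp only [List.foldl_cons]; rw [min_right_comm]; exact ih (min d z)

theorem getD_zero_mem_take (a : List Int) (ha : a ≠ []) (k : Nat) (hk : 1 ≤ k) :
    a.getD 0 0 ∈ a.take k := by
  cases a with
  | nil => exact absurd rfl ha
  | cons x t => cases k with
    | zero => omega
    | succ m => simp

theorem getD_last_mem_drop (a : List Int) (k : Nat) (hk : k < a.length) :
    a.getD (a.length - 1) 0 ∈ a.drop k := by
  have h1 : a.length - 1 < a.length := by omega
  have h2 : a.length - 1 - k < (a.drop k).length := by simp [List.length_drop]; omega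
  have : (a.drop k)[a.length - 1 - k] = a[a.length - 1] := by
    rw [List.getElem_drop]; congr 1; omega
  rw [List.getD_eq_getElem a 0 h1, ← this]
  exact List.getElem_mem h2

theorem mTake_succ (a : List Int) (k : Nat) (hk : k < a.length) :
    mTake a (k + 1) = min (mTake a k) (a.getD k 0) := by
  unfold mTake
  have h1 : a[k]?.toList = [a.getD k 0] := by
    rw [List.getElem?_eq_getElem hk, List.getD_eq_getElem a 0 hk]
    rfl
  rw [List.take_add_one, h1, List.foldl_append]
  simp

theorem mDrop_pred (a : List Int) (j : Nat) (hj : j < a.length) :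
    mDrop a j = min (mDrop a (j + 1)) (a.getD j 0) := by
  unfold mDrop
  rw [List.drop_eq_getElem_cons hj]
  simp only [List.foldl_cons]
  rw [← List.getD_eq_getElem a 0 hj, foldl_min_comm]

theorem mTake_one (a : List Int) (ha : a ≠ []) : mTake a 1 = a.getD 0 0 := by
  cases a with
  | nil => exact absurd rfl ha
  | cons x t => simp [mTake]

theorem mDrop_last (a : List Int) (ha : a ≠ []) : mDrop a (a.length - 1) = a.getD (a.length - 1) 0 := by
  have h : a.length - 1 < a.length := by cases a with | nil => exact absurd rfl ha | cons x t => simp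
  unfold mDrop
  rw [List.drop_eq_getElem_cons h]
  have h2 : a.drop (a.length - 1 + 1) = [] := by apply List.drop_eq_nil_of_le; omega
  rw [h2]
  simp [List.getD_eq_getElem a 0 h, List.getElem?_eq_getElem h]

theorem cond_left (a : List Int) (ha : a ≠ []) (k : Nat) (hk1 : 1 ≤ k) :
    a.getD k 0 < mTake a k ↔ Pb a k = true := by
  unfold mTake Pb
  rw [lt_foldl_min, List.all_eq_true]
  constructor
  · rintro ⟨h1, h2⟩ x hx; simpa using h2 x hx
  · intro h
    refine ⟨by simpa using h _ (getD_zero_mem_take a ha k hk1), fun y hy => by simpa using h y hy⟩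

theorem cond_right (a : List Int) (j : Nat) (hj : j + 1 < a.length) :
    a.getD j 0 < mDrop a (j + 1) ↔ Qb a j = true := by
  unfold mDrop Qb
  rw [lt_foldl_min, List.all_eq_true]
  constructor
  · rintro ⟨h1, h2⟩ x hx; simpa using h2 x hx
  · intro h
    refine ⟨by simpa using h _ (getD_last_mem_drop a (j + 1) hj), fun y hy => by simpa using h y hy⟩

theorem Pb_zero (a : List Int) : Pb a 0 = true := by simp [Pb]

theorem Qb_last (a : List Int) (ha : a ≠ []) : Qb a (a.length - 1) = true := by
  unfold Qb
  have h2 : a.drop (a.length - 1 + 1) = [] := by apply List.drop_eq_nil_of_le; omega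
  simp [h2]

theorem getD_set_eq (l : List Int) (i : Nat) (v : Int) (h : i < l.length) :
    (l.set i v).getD i 0 = v := by
  rw [List.getD_eq_getElem _ 0 (by simpa using h)]
  simp [h]

theorem getD_set_ne (l : List Int) (i j : Nat) (v : Int) (h : j ≠ i) :
    (l.set i v).getD j 0 = l.getD j 0 := by
  unfold List.getD
  rw [List.getElem?_set_ne (by omega)]

theorem getD_replicate_zero (n i : Nat) : (List.replicate n (0 : Int)).getD i 0 = 0 := by
  unfold List.getD
  rw [List.getElem?_replicate]
  split <;> simp

-- ===== A-side loop characterisations =====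

theorem leftA_loop (a : List Int) (ha : a ≠ []) :
    ∀ (c k : Nat) (mc : List Int), 1 ≤ k → k + c = a.length →
    mc.length = a.length →
    (∀ i, mc.getD i 0 = if i < k then lv a i else 0) →
    ((List.range' k c).foldl (stepA a) (mTake a k, mc)).2.length = a.length ∧
    ∀ i, ((List.range' k c).foldl (stepA a) (mTake a k, mc)).2.getD i 0 =
      if i < a.length then lv a i else 0 := by
  intro c
  induction c with
  | zero =>
    intro k mc hk hc hlen hmc
    simp only [List.range'_zero, List.foldl_nil]
    exact ⟨hlen, fun i => by rw [hmc i]; congr 1; simp; omega⟩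
  | succ c ih =>
    intro k mc hk hc hlen hmc
    have hkn : k < a.length := by omega
    rw [List.range'_succ, List.foldl_cons]
    by_cases hP : Pb a k = true
    · have hlt : a.getD k 0 < mTake a k := (cond_left a ha k hk).mpr hP
      have hstep : stepA a (mTake a k, mc) k = (mTake a (k + 1), mc) := by
        unfold stepA
        rw [if_pos (by simpa using hlt)]
        rw [mTake_succ a k hkn, min_eq_right (le_of_lt hlt)]
      rw [hstep]
      exact ih (k + 1) mc (by omega) (by omega) hlen (fun i => by
        rw [hmc i]
        by_cases hik : i < k
        · rw [if_pos hik, if_pos (by omega)]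
        · by_cases hik' : i = k
          · rw [hik', if_neg (by omega), if_pos (by omega)]
            simp [lv, hP]
          · rw [if_neg hik, if_neg (by omega)])
    · have hnlt : ¬ a.getD k 0 < mTake a k := fun h => hP ((cond_left a ha k hk).mp h)
      have hstep : stepA a (mTake a k, mc) k =
          (mTake a (k + 1), mc.set k (mc.getD k 0 + 1)) := by
        unfold stepA
        rw [if_neg (by simpa using hnlt)]
        rw [mTake_succ a k hkn, min_eq_left (by omega)]
      rw [hstep]
      exact ih (k + 1) _ (by omega) (by omega) (by simpa using hlen) (fun i => by
        by_cases hik' : i = k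
        · rw [hik', getD_set_eq _ _ _ (by omega), hmc k, if_neg (by omega), if_pos (by omega)]
          simp [lv, hP]
        · rw [getD_set_ne _ _ _ _ hik', hmc i]
          by_cases hik : i < k
          · rw [if_pos hik, if_pos (by omega)]
          · rw [if_neg hik, if_neg (by omega)])

theorem rightA_loop (a : List Int) (ha : a ≠ []) :
    ∀ (k : Nat) (mc : List Int), k ≤ a.length - 1 →
    mc.length = a.length →
    (∀ i, mc.getD i 0 = if i < a.length then lv a i + (if k ≤ i then rv a i else 0) else 0) →
    (((List.range k).reverse).foldl (stepA a) (mDrop a k, mc)).2.length = a.length ∧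
    ∀ i, (((List.range k).reverse).foldl (stepA a) (mDrop a k, mc)).2.getD i 0 =
      if i < a.length then lv a i + rv a i else 0 := by
  intro k
  induction k with
  | zero =>
    intro mc hk hlen hmc
    simp only [List.range_zero, List.reverse_nil, List.foldl_nil]
    exact ⟨hlen, fun i => by rw [hmc i]; by_cases h : i < a.length <;> simp [h]⟩
  | succ k ih =>
    intro mc hk hlen hmc
    have hkn : k + 1 < a.length := by omega
    rw [List.range_succ, List.reverse_append, List.reverse_singleton, List.singleton_append,
      List.foldl_cons]
    by_cases hQ : Qb a k = true
    · have hlt : a.getD k 0 < mDrop a (k + 1) := (cond_right a k hkn).mpr hQ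
      have hstep : stepA a (mDrop a (k + 1), mc) k = (mDrop a k, mc) := by
        unfold stepA
        rw [if_pos (by simpa using hlt)]
        rw [mDrop_pred a k (by omega), min_eq_right (le_of_lt hlt)]
      rw [hstep]
      exact ih mc (by omega) hlen (fun i => by
        rw [hmc i]
        by_cases hin : i < a.length
        · rw [if_pos hin, if_pos hin]
          by_cases hik : k + 1 ≤ i
          · rw [if_pos hik, if_pos (by omega)]
          · by_cases hik2 : i = k
            · rw [hik2, if_neg (by omega), if_pos (by omega)]
              simp [rv, hQ]
            · rw [if_neg (by omega), if_neg (by omega)]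
        · rw [if_neg hin, if_neg hin])
    · have hnlt : ¬ a.getD k 0 < mDrop a (k + 1) := fun h => hQ ((cond_right a k hkn).mp h)
      have hstep : stepA a (mDrop a (k + 1), mc) k =
          (mDrop a k, mc.set k (mc.getD k 0 + 1)) := by
        unfold stepA
        rw [if_neg (by simpa using hnlt)]
        rw [mDrop_pred a k (by omega), min_eq_left (by omega)]
      rw [hstep]
      exact ih _ (by omega) (by simpa using hlen) (fun i => by
        by_cases hik' : i = k
        · rw [hik', getD_set_eq _ _ _ (by omega), hmc k, if_pos (by omega), if_neg (by omega),
            if_pos (by omega)]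
          simp [rv, hQ]
        · rw [getD_set_ne _ _ _ _ hik', hmc i]
          by_cases hin : i < a.length
          · rw [if_pos hin, if_pos hin]
            by_cases hik : k + 1 ≤ i
            · rw [if_pos (by omega), if_pos (by omega)]
            · rw [if_neg (by omega), if_neg (by omega)]
          · rw [if_neg hin, if_neg hin])

theorem eq_map_of_getD (l : List Int) (n : Nat) (f : Nat → Int) (hlen : l.length = n)
    (h : ∀ i, l.getD i 0 = if i < n then f i else 0) :
    l = (List.range n).map f := by
  apply List.ext_getElem (by simpa using hlen)
  intro i h1 h2
  have := h i
  rw [List.getD_eq_getElem _ 0 h1, if_pos (by omega)] at this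
  simpa using this

theorem filter_ne_two (a : List Int) :
    (((List.range a.length).map (fun i => lv a i + rv a i)).filter (fun x => x != 2)).length =
      (List.range a.length).countP (fun i => Pb a i || Qb a i) := by
  rw [List.filter_map, List.length_map, ← List.countP_eq_length_filter]
  apply List.countP_congr
  intro i _
  simp only [Function.comp]
  unfold lv rv
  by_cases hP : Pb a i = true <;> by_cases hQ : Qb a i = true <;> simp [hP, hQ]

theorem A_char (a : List Int) (ha : a ≠ []) :
    solution a = ((List.range a.length).countP (fun i => Pb a i || Qb a i) : Int) := by
  unfold solution
  dsimp only
  have hn : 1 ≤ a.length := by cases a with | nil => exact absurd rfl ha | cons x t => simp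
  have hrep : ∀ i, (List.replicate a.length (0 : Int)).getD i 0 = if i < 1 then lv a i else 0 := by
    intro i
    rw [getD_replicate_zero]
    by_cases hi : i < 1
    · have h0 : i = 0 := by omega
      rw [h0, if_pos (by omega)]
      simp [lv, Pb_zero]
    · rw [if_neg hi]
  rw [(mTake_one a ha).symm, (mDrop_last a ha).symm]
  have hleft := leftA_loop a ha (a.length - 1) 1 (List.replicate a.length 0) (by omega) (by omega)
    (by simp) hrep
  have hmc1 : ∀ i, ((List.range' 1 (a.length - 1)).foldl (stepA a)
      (mTake a 1, List.replicate a.length 0)).2.getD i 0 =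
      if i < a.length then lv a i + (if a.length - 1 ≤ i then rv a i else 0) else 0 := by
    intro i
    rw [hleft.2 i]
    by_cases hin : i < a.length
    · rw [if_pos hin, if_pos hin]
      by_cases hik : a.length - 1 ≤ i
      · have hieq : i = a.length - 1 := by omega
        rw [if_pos hik, hieq]
        simp [rv, Qb_last a ha]
      · rw [if_neg hik]; ring
    · rw [if_neg hin, if_neg hin]
  have hright := rightA_loop a ha (a.length - 1)
    ((List.range' 1 (a.length - 1)).foldl (stepA a) (mTake a 1, List.replicate a.length 0)).2
    (by omega) hleft.1 hmc1
  have hmap := eq_map_of_getD _ a.length (fun i => lv a i + rv a i) hright.1 hright.2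
  rw [hmap, filter_ne_two a]

-- B's per-index test equals Pb ∨ Qb
theorem predB_eq (a : List Int) (ha : a ≠ []) (i : Nat) (hi : i < a.length) :
    (((i == 0) || decide (a.getD i 0 < (a.take i).foldl min (a.getD 0 0))) ||
     ((i == a.length - 1) || decide (a.getD i 0 < (a.drop (i + 1)).foldl min (a.getD (i + 1) 0))))
    = (Pb a i || Qb a i) := by
  congr 1
  · by_cases h0 : i = 0
    · subst h0; simp [Pb_zero]
    · have h1 : 1 ≤ i := by omega
      have hiff := cond_left a ha i h1
      unfold mTake at hiff
      have hb : (i == 0) = false := by simp [h0]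
      rw [hb, Bool.false_or]
      by_cases hP : Pb a i = true
      · rw [hP]; exact decide_eq_true (hiff.mpr hP)
      · have hnot : ¬ a.getD i 0 < (a.take i).foldl min (a.getD 0 0) := fun h => hP (hiff.mp h)
        have hf : Pb a i = false := by simpa using hP
        rw [hf]; exact decide_eq_false hnot
  · by_cases hlast : i = a.length - 1
    · subst hlast; simp [Qb_last a ha]
    · have h1 : i + 1 < a.length := by omega
      have hhead : a.getD (i + 1) 0 ∈ a.drop (i + 1) := by
        rw [List.drop_eq_getElem_cons h1, List.getD_eq_getElem a 0 h1]
        exact List.mem_cons_self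
      have hiff : a.getD i 0 < (a.drop (i + 1)).foldl min (a.getD (i + 1) 0) ↔ Qb a i = true := by
        unfold Qb
        rw [lt_foldl_min, List.all_eq_true]
        constructor
        · rintro ⟨hA, hB⟩ x hx; simpa using hB x hx
        · intro h
          exact ⟨by simpa using h _ hhead, fun y hy => by simpa using h y hy⟩
      have hb : (i == a.length - 1) = false := by simp [hlast]
      rw [hb, Bool.false_or]
      by_cases hQ : Qb a i = true
      · rw [hQ]; exact decide_eq_true (hiff.mpr hQ)
      · have hnot : ¬ a.getD i 0 < (a.drop (i + 1)).foldl min (a.getD (i + 1) 0) :=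
          fun h => hQ (hiff.mp h)
        have hf : Qb a i = false := by simpa using hQ
        rw [hf]; exact decide_eq_false hnot

theorem B_char (a : List Int) (ha : a ≠ []) :
    solution_alt a = ((List.range a.length).countP (fun i => Pb a i || Qb a i) : Int) := by
  unfold solution_alt
  congr 1
  exact List.countP_congr (fun i hi => by rw [predB_eq a ha i (List.mem_range.mp hi)])

-- ===== VERDICT (by name: the statement is the Claim_ definition above) =====
theorem solution_spec : Claim_equal_solution := by
  intro a hdom hpre
  unfold Spec_solution
  rw [A_char a hpre, B_char a hpre]
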